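-- pv_equiv track=rewrite | github.com/fuverdred/Advent_2019 | day_16.py | compute_phase
-- ===== SOURCE A (Python) =====
-- from math import ceil
--
-- base_pattern = [0, 1, 0, -1]
--
-- def nth_pattern(n, N):
--     pattern = [i for i in base_pattern for _ in range(n)]
--     multiplier = ceil((N+1)/len(pattern))
--     return multiplier * pattern
--
-- def compute_phase(inputs):
--     N = len(inputs)
--     new = []
--     for n, val in enumerate(inputs,1):
--         pattern = nth_pattern(n, N)
--         total = sum([pattern[i]*val for i,val in enumerate(inputs, 1)])
--         new.append(abs(total)%10)
--     return new
-- ===== SOURCE B (Python) =====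
-- def compute_phase(inputs):
--     N = len(inputs)
--     prefix = [0]
--     for v in inputs:
--         prefix.append(prefix[-1] + v)
--     out = []
--     for n in range(1, N + 1):
--         total = 0
--         sign = 1
--         start = n
--         while start <= N:
--             end = min(start + n - 1, N)
--             total += sign * (prefix[end] - prefix[start - 1])
--             sign = -sign
--             start += 2 * n
--         out.append(abs(total) % 10)
--     return out
-- ===== Notes on version B (the rewrite author's own statement) =====
-- stated objective: faster
-- what changed: Replaces the per-digit full dot product with the repeated pattern (O(N) per digit after building the pattern) by one prefix-sum array plus per digit a sum over the contiguous +1/-1 blocks, O(N/n) block lookups for digit n, giving O(N log N) overall.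
import Mathlib
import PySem

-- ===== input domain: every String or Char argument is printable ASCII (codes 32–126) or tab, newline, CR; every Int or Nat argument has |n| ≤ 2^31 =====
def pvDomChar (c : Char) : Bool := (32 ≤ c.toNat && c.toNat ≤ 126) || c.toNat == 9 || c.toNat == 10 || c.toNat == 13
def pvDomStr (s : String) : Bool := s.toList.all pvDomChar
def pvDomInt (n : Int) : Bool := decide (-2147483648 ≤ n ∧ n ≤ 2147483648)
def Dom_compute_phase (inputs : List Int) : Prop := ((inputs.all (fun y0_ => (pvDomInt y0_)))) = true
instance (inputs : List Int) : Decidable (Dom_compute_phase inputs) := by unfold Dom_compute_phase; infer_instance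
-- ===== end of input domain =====

-- B replaces A's per-digit dot product with the full repeated pattern by one prefix-sum
-- array plus, per digit n, a walk over the contiguous +1/-1 blocks of the pattern.

-- ===== PORT A =====
-- math.ceil((N+1)/len(pattern)): exact integer ceiling (len > 0), ported as Nat ceiling
-- division.  range(n) for int n repeats max(n,0) = n.toNat times.
def nth_pattern (n : Int) (N : Nat) : List Int :=
  let pattern := ([0, 1, 0, -1] : List Int).flatMap (fun i => List.replicate n.toNat i)
  let multiplier := (N + 1 + (pattern.length - 1)) / pattern.length
  (List.replicate multiplier pattern).flatten

-- pattern[i] is always in range (len(pattern) ≥ N+1), so the getD default is never used.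
def compute_phase (inputs : List Int) : List Int :=
  let N := inputs.length
  (PySem.List.enumerate inputs 1).foldl (fun new p =>
    let pattern := nth_pattern p.1 N
    let total := ((PySem.List.enumerate inputs 1).map
      (fun q => PySem.List.pyGetD pattern q.1 0 * q.2)).sum
    new ++ [PySem.Int.mod |total| 10]) []

-- ===== PORT B =====
-- Source B's while loop over the blocks of digit n; the loop variable n ≥ 1 is carried as m+1.
-- prefix[end]/prefix[start-1] indices are always in range, so the getD default is never used.
def blockSum (pref : List Int) (N m : Nat) (start : Nat) (sign total : Int) : Int :=
  if start ≤ N then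
    let e := min (start + (m+1) - 1) N
    blockSum pref N m (start + 2*(m+1)) (-sign)
      (total + sign * (pref.getD e 0 - pref.getD (start-1) 0))
  else total
termination_by N + 1 - start
decreasing_by omega

-- 'for n in range(1, N+1)' is iterated as k = 0..N-1 with n = k+1.
def compute_phase_alt (inputs : List Int) : List Int :=
  let N := inputs.length
  let pref := inputs.foldl (fun p v => p ++ [PySem.List.pyGetD p (-1) 0 + v]) [0]
  (List.range N).foldl (fun out k =>
    out ++ [PySem.Int.mod |blockSum pref N k (k+1) 1 0| 10]) []

-- ===== PRECONDITION & SPEC =====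
def Spec_compute_phase (inputs : List Int) (out : List Int) : Prop := out = compute_phase_alt inputs
instance (inputs : List Int) (out : List Int) : Decidable (Spec_compute_phase inputs out) := by unfold Spec_compute_phase; infer_instance

-- ===== CLAIM (what is proved, stated in full; the proofs are below) =====
def Claim_equal_compute_phase : Prop := ∀ (inputs : List Int), Dom_compute_phase inputs → Spec_compute_phase inputs (compute_phase inputs)

-- ===== LEMMAS AND PROOFS =====

-- the ±1/0 coefficient of the block walk, r blocks of size n past position n
def eCoef (r : Nat) : Int := if r % 4 = 0 then 1 else if r % 4 = 2 then -1 else 0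

-- the prefix-sum tail Source B's fold builds after the leading 0
def prefAux (a : Int) : List Int → List Int
  | [] => []
  | x :: xs => (a + x) :: prefAux (a + x) xs

lemma eCoef_add_two (r : Nat) : eCoef (r + 2) = -eCoef r := by
  unfold eCoef; split_ifs <;> omega

lemma prefAux_foldl (xs : List Int) : ∀ (acc : List Int) (a : Int),
    PySem.List.pyGetD acc (-1) 0 = a →
    xs.foldl (fun p v => p ++ [PySem.List.pyGetD p (-1) 0 + v]) acc = acc ++ prefAux a xs := by
  induction xs with
  | nil => intro acc a _; simp [prefAux]
  | cons x xs ih =>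
    intro acc a ha
    simp only [List.foldl_cons, prefAux, ha]
    rw [ih (acc ++ [a + x]) (a + x) (PySem.List.pyGetD_neg_one_append_singleton _ _ _)]
    simp

lemma prefAux_getD (xs : List Int) : ∀ (a : Int) (k : Nat), k < xs.length →
    (prefAux a xs).getD k 0 = a + (xs.take (k + 1)).sum := by
  induction xs with
  | nil => intro a k h; simp at h
  | cons x xs ih =>
    intro a k h
    cases k with
    | zero => simp [prefAux]
    | succ k =>
      simp only [prefAux, List.getD_cons_succ, List.take_succ_cons, List.sum_cons]
      rw [ih (a + x) k (by simpa using h)]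
      ring

lemma sum_take_eq (xs : List Int) : ∀ (k : Nat), k ≤ xs.length →
    (xs.take k).sum = ∑ j ∈ Finset.range k, xs.getD j 0 := by
  intro k hk
  induction k with
  | zero => simp
  | succ k ih =>
    rw [Finset.sum_range_succ, ← ih (by omega), List.sum_take_succ xs k (by omega)]
    simp [List.getD, List.getElem?_eq_getElem (by omega : k < xs.length)]

lemma flatten_replicate_getD (l : List Int) (m j : Nat) (h : j < m * l.length) :
    ((List.replicate m l).flatten).getD j 0 = l.getD (j % l.length) 0 := by
  induction m generalizing j with
  | zero => omega
  | succ m ih =>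
    have hl : 0 < l.length := by by_contra h0; simp at h0; simp [h0] at h
    rw [List.replicate_succ, List.flatten_cons]
    by_cases hj : j < l.length
    · rw [List.getD_append _ _ _ _ hj, Nat.mod_eq_of_lt hj]
    · push_neg at hj
      have h' : j - l.length < m * l.length := by rw [Nat.succ_mul] at h; omega
      rw [List.getD_append_right _ _ _ _ hj, ih (j - l.length) h', Nat.mod_eq_sub_mod hj]

lemma pattern_getD (n j : Nat) (hn : 0 < n) (hj : j < 4 * n) :
    (([0, 1, 0, -1] : List Int).flatMap (fun i => List.replicate n i)).getD j 0
      = ([0, 1, 0, -1] : List Int).getD (j / n) 0 := by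
  simp only [List.flatMap_cons, List.flatMap_nil, List.append_nil]
  by_cases h1 : j < n
  · rw [List.getD_append _ _ _ _ (by simpa using h1), Nat.div_eq_of_lt h1]
    simp [List.getD_eq_getElem?_getD, List.getElem?_replicate, h1]
  push_neg at h1
  by_cases h2 : j < 2 * n
  · rw [List.getD_append_right _ _ _ _ (by simpa using h1),
      List.getD_append _ _ _ _ (by simp; omega)]
    have hd : j / n = 1 := Nat.div_eq_of_lt_le (by omega) (by omega)
    rw [hd]
    simp [List.getD_eq_getElem?_getD, List.getElem?_replicate]
    simp [show j - n < n by omega]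
  push_neg at h2
  by_cases h3 : j < 3 * n
  · rw [List.getD_append_right _ _ _ _ (by simpa using h1),
      List.getD_append_right _ _ _ _ (by simp; omega),
      List.getD_append _ _ _ _ (by simp; omega)]
    have hd : j / n = 2 := Nat.div_eq_of_lt_le (by omega) (by omega)
    rw [hd]
    simp [List.getD_eq_getElem?_getD, List.getElem?_replicate]
    simp [show j - n - n < n by omega]
  push_neg at h3
  · rw [List.getD_append_right _ _ _ _ (by simpa using h1),
      List.getD_append_right _ _ _ _ (by simp; omega),
      List.getD_append_right _ _ _ _ (by simp; omega)]
    have hd : j / n = 3 := Nat.div_eq_of_lt_le (by omega) (by omega)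
    rw [hd]
    simp [List.getD_eq_getElem?_getD, List.getElem?_replicate]
    simp [show j - n - n - n < n by omega]

lemma nth_pattern_getD (n N i : Nat) (hn : 0 < n) (hi : i ≤ N) :
    PySem.List.pyGetD (nth_pattern (n : Int) N) ((i : Nat) : Int) 0
      = ([0, 1, 0, -1] : List Int).getD ((i % (4 * n)) / n) 0 := by
  unfold nth_pattern
  simp only [PySem.List.pyGetD_natCast, Int.toNat_natCast]
  have hlen : (([0, 1, 0, -1] : List Int).flatMap (fun i => List.replicate n i)).length = 4 * n := by
    simp [List.flatMap_cons]; ring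
  simp only [hlen]
  have h4 : 0 < 4 * n := by omega
  have hmul : N < ((N + 4 * n) / (4 * n)) * (4 * n) := by
    have := Nat.lt_div_mul_add h4 (a := N + 4 * n)
    omega
  rw [show N + 1 + (4 * n - 1) = N + 4 * n by omega]
  rw [List.getD_eq_getElem?_getD, ← List.getD_eq_getElem?_getD]
  rw [flatten_replicate_getD _ _ _ (by rw [hlen]; omega)]
  rw [hlen, pattern_getD n _ hn (Nat.mod_lt _ h4)]

lemma coefA_lt (n i : Nat) (hn : 0 < n) (hi : i < n) :
    ([0, 1, 0, -1] : List Int).getD ((i % (4 * n)) / n) 0 = 0 := by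
  rw [Nat.mod_eq_of_lt (by omega), Nat.div_eq_of_lt hi]
  rfl

lemma coefA_ge (n i : Nat) (hn : 0 < n) (hi : n ≤ i) :
    ([0, 1, 0, -1] : List Int).getD ((i % (4 * n)) / n) 0 = eCoef ((i - n) / n) := by
  have hmm : i % (4 * n) / n = i / n % 4 := by
    rw [show 4 * n = n * 4 by ring]
    exact Nat.mod_mul_right_div_self i n 4
  have hq1 : 1 ≤ i / n := (Nat.one_le_div_iff hn).mpr hi
  have hsub : (i - n) / n = i / n - 1 := by
    have h1 : i - n + 1 * n = i := by omega
    have h2 := Nat.add_mul_div_right (i - n) 1 hn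
    rw [h1] at h2
    omega
  rw [hmm, hsub]
  set q := i / n with hq
  have h4 : q % 4 = 0 ∨ q % 4 = 1 ∨ q % 4 = 2 ∨ q % 4 = 3 := by omega
  rcases h4 with h | h | h | h <;>
    · first
      | (rw [h]; simp [eCoef, show (q - 1) % 4 = 3 by omega])
      | (rw [h]; simp [eCoef, show (q - 1) % 4 = 0 by omega])
      | (rw [h]; simp [eCoef, show (q - 1) % 4 = 1 by omega])
      | (rw [h]; simp [eCoef, show (q - 1) % 4 = 2 by omega])

lemma sum_map_enumerate (xs : List Int) (f : Int → Int → Int) : ∀ (s : Int),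
    ((PySem.List.enumerate xs s).map (fun q => f q.1 q.2)).sum
      = ∑ k ∈ Finset.range xs.length, f (s + k) (xs.getD k 0) := by
  induction xs with
  | nil => intro s; simp [PySem.List.enumerate_nil]
  | cons x xs ih =>
    intro s
    rw [PySem.List.enumerate_cons, List.map_cons, List.sum_cons, ih (s + 1)]
    rw [List.length_cons, Finset.sum_range_succ']
    simp only [List.getD_cons_succ, List.getD_cons_zero]
    have : ∀ k : Nat, s + 1 + (k : Int) = s + ((k : Nat) + 1 : Nat) := by
      intro k; push_cast; ring
    rw [Finset.sum_congr rfl (fun k _ => by rw [this k])]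
    push_cast
    ring

lemma blockSum_eq (pref : List Int) (N m : Nat) (x : Nat → Int)
    (hpref : ∀ k, k ≤ N → pref.getD k 0 = ∑ j ∈ Finset.range k, x j) :
    ∀ (start : Nat) (sign total : Int), 1 ≤ start →
    blockSum pref N m start sign total
      = total + sign * ∑ i ∈ Finset.Ico start (N + 1), eCoef ((i - start) / (m + 1)) * x (i - 1) := by
  intro start sign total hstart
  induction start, sign, total using blockSum.induct pref N m with
  | case2 start sign total h =>
    rw [blockSum, if_neg h, Finset.Ico_eq_empty (by omega)]
    simp
  | case1 start sign total h e ih =>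
    rw [blockSum, if_pos h]
    specialize ih (by omega)
    rw [ih]
    set n := m + 1 with hn
    have hPe : pref.getD e 0 = ∑ j ∈ Finset.range e, x j := hpref e (by omega)
    have hPs : pref.getD (start - 1) 0 = ∑ j ∈ Finset.range (start - 1), x j :=
      hpref (start - 1) (by omega)
    have hblock : pref.getD e 0 - pref.getD (start - 1) 0
        = ∑ i ∈ Finset.Ico start (min (start + n) (N + 1)), x (i - 1) := by
      rw [hPe, hPs, ← Finset.sum_Ico_eq_sub x (show start - 1 ≤ e by omega)]
      rw [Finset.sum_Ico_eq_sum_range, Finset.sum_Ico_eq_sum_range]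
      have hlen : min (start + n) (N + 1) - start = e - (start - 1) := by omega
      rw [hlen]
      refine Finset.sum_congr rfl (fun k _ => ?_)
      congr 1
      omega
    have h1 : start ≤ min (start + n) (N + 1) := by omega
    have h2 : min (start + n) (N + 1) ≤ min (start + 2 * n) (N + 1) := by omega
    have h3 : min (start + 2 * n) (N + 1) ≤ N + 1 := by omega
    rw [← Finset.sum_Ico_consecutive _ h1 (le_trans h2 h3),
        ← Finset.sum_Ico_consecutive _ h2 h3]
    have hc1 : ∑ i ∈ Finset.Ico start (min (start + n) (N + 1)), eCoef ((i - start) / n) * x (i - 1)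
        = ∑ i ∈ Finset.Ico start (min (start + n) (N + 1)), x (i - 1) := by
      refine Finset.sum_congr rfl (fun i hi => ?_)
      rw [Finset.mem_Ico] at hi
      rw [Nat.div_eq_of_lt (by omega), show eCoef 0 = 1 from rfl, one_mul]
    have hc2 : ∑ i ∈ Finset.Ico (min (start + n) (N + 1)) (min (start + 2 * n) (N + 1)),
        eCoef ((i - start) / n) * x (i - 1) = 0 := by
      refine Finset.sum_eq_zero (fun i hi => ?_)
      rw [Finset.mem_Ico] at hi
      have hd : (i - start) / n = 1 := Nat.div_eq_of_lt_le (by omega) (by omega)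
      rw [hd, show eCoef 1 = 0 from rfl, zero_mul]
    have hc3 : ∑ i ∈ Finset.Ico (min (start + 2 * n) (N + 1)) (N + 1),
        eCoef ((i - start) / n) * x (i - 1)
        = -∑ i ∈ Finset.Ico (start + 2 * n) (N + 1),
            eCoef ((i - (start + 2 * n)) / n) * x (i - 1) := by
      by_cases hcase : start + 2 * n ≤ N + 1
      · rw [min_eq_left hcase, ← Finset.sum_neg_distrib]
        refine Finset.sum_congr rfl (fun i hi => ?_)
        rw [Finset.mem_Ico] at hi
        have hshift : (i - start) / n = (i - (start + 2 * n)) / n + 2 := by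
          have h1' : i - start = (i - (start + 2 * n)) + 2 * n := by omega
          rw [h1', Nat.add_mul_div_right _ 2 (show 0 < n by omega)]
        rw [hshift, eCoef_add_two]
        ring
      · rw [Finset.Ico_eq_empty (by omega), Finset.Ico_eq_empty (by omega)]
        simp
    rw [hc1, hc2, hc3, hblock]
    ring

-- per-digit agreement: A's full dot product = B's block walk
lemma per_digit (inputs : List Int) (k : Nat) (hk : k < inputs.length) :
    ((PySem.List.enumerate inputs 1).map
      (fun q => PySem.List.pyGetD (nth_pattern (1 + (k : Int)) inputs.length) q.1 0 * q.2)).sum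
    = blockSum (0 :: prefAux 0 inputs) inputs.length k (k + 1) 1 0 := by
  set N := inputs.length with hN
  set x : Nat → Int := fun j => inputs.getD j 0 with hx
  have hn : 0 < k + 1 := Nat.succ_pos k
  have hpref : ∀ kk, kk ≤ N → (0 :: prefAux 0 inputs).getD kk 0 = ∑ j ∈ Finset.range kk, x j := by
    intro kk hkk
    cases kk with
    | zero => simp
    | succ s =>
      rw [List.getD_cons_succ, prefAux_getD inputs 0 s (by omega), zero_add,
        sum_take_eq inputs (s + 1) (by omega)]
  rw [blockSum_eq _ N k x hpref (k + 1) 1 0 (by omega), zero_add, one_mul]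
  have hcast : (1 + (k : Int)) = ((k + 1 : Nat) : Int) := by push_cast; ring
  rw [hcast]
  rw [sum_map_enumerate inputs (fun a b => PySem.List.pyGetD (nth_pattern ((k + 1 : Nat) : Int) N) a 0 * b) 1]
  have hstep : ∀ j, j ∈ Finset.range N →
      PySem.List.pyGetD (nth_pattern ((k + 1 : Nat) : Int) N) (1 + (j : Int)) 0 * x j
        = ([0, 1, 0, -1] : List Int).getD (((j + 1) % (4 * (k + 1))) / (k + 1)) 0 * x j := by
    intro j hj
    rw [Finset.mem_range] at hj
    rw [show (1 + (j : Int)) = ((j + 1 : Nat) : Int) by push_cast; ring]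
    rw [nth_pattern_getD (k + 1) N (j + 1) hn (by omega)]
  rw [Finset.sum_congr rfl hstep]
  have hre : ∑ i ∈ Finset.Ico 1 (N + 1),
      ([0, 1, 0, -1] : List Int).getD ((i % (4 * (k + 1))) / (k + 1)) 0 * x (i - 1)
      = ∑ j ∈ Finset.range N,
        ([0, 1, 0, -1] : List Int).getD (((j + 1) % (4 * (k + 1))) / (k + 1)) 0 * x j := by
    rw [Finset.sum_Ico_eq_sum_range]
    simp only [Nat.add_sub_cancel]
    refine Finset.sum_congr rfl (fun j _ => ?_)
    rw [show 1 + j = j + 1 by omega]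
    simp
  rw [← hre]
  by_cases hbig : k + 1 ≤ N + 1
  · rw [← Finset.sum_Ico_consecutive _ (show 1 ≤ k + 1 by omega) hbig]
    have hz : ∑ i ∈ Finset.Ico 1 (k + 1),
        ([0, 1, 0, -1] : List Int).getD ((i % (4 * (k + 1))) / (k + 1)) 0 * x (i - 1) = 0 := by
      refine Finset.sum_eq_zero (fun i hi => ?_)
      rw [Finset.mem_Ico] at hi
      rw [coefA_lt (k + 1) i hn (by omega), zero_mul]
    rw [hz, zero_add]
    refine Finset.sum_congr rfl (fun i hi => ?_)
    rw [Finset.mem_Ico] at hi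
    rw [coefA_ge (k + 1) i hn (by omega)]
  · omega

-- ===== VERDICT (by name: the statement is the Claim_ definition above) =====
theorem compute_phase_spec : Claim_equal_compute_phase := by
  intro inputs _
  unfold Spec_compute_phase
  unfold compute_phase compute_phase_alt
  rw [prefAux_foldl inputs [0] 0 rfl]
  rw [PySem.List.foldl_append_singleton_eq_map, PySem.List.foldl_append_singleton_eq_map]
  simp only [List.nil_append]
  have hmap : (PySem.List.enumerate inputs 1).map (fun p =>
      PySem.Int.mod |((PySem.List.enumerate inputs 1).map
        (fun q => PySem.List.pyGetD (nth_pattern p.1 inputs.length) q.1 0 * q.2)).sum| 10)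
      = ((PySem.List.enumerate inputs 1).map (·.1)).map (fun i =>
      PySem.Int.mod |((PySem.List.enumerate inputs 1).map
        (fun q => PySem.List.pyGetD (nth_pattern i inputs.length) q.1 0 * q.2)).sum| 10) := by
    rw [List.map_map]
    rfl
  rw [hmap, PySem.List.map_fst_enumerate, PySem.List.pyRange_one, List.map_map]
  rw [show ((1 : Int) + inputs.length - 1).toNat = inputs.length by omega]
  simp only [List.singleton_append]
  refine List.map_congr_left (fun k hkmem => ?_)
  rw [List.mem_range] at hkmem
  simp only [Function.comp_apply]
  rw [per_digit inputs k hkmem]
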